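-- pv_equiv track=rewrite | github.com/YasminTeles/Maratona | 2409_Colchao/Colchao.py | passaPelaPorta
-- ===== SOURCE A (Python) =====
-- def passaPelaPorta(colchao, porta):
--     if porta[0] > porta[1]:
--         maior = porta[0]
--         menor = porta[1]
--     else:
--         maior = porta[1]
--         menor = porta[0]
--
--     colchao_ordenado = sorted(colchao)
--     tam = len(colchao_ordenado)
--     resultMenor = False
--     resultMaior = False
--
--     for i in range(tam):
--         if menor >= colchao_ordenado[i]:
--             colchao_ordenado[i] = 'x'
--             resultMenor = True
--             break
--
--     for i in range(tam):
--         if colchao_ordenado[(i - tam)] != 'x' and (maior >= colchao_ordenado[(i - tam)]):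
--             colchao_ordenado[(i - tam)] = 'x'
--             resultMaior = True
--             break
--
--     if resultMaior and resultMenor:
--         return "S"
--     else:
--         return "N"
-- ===== SOURCE B (Python) =====
-- def passaPelaPorta(colchao, porta):
--     menor, maior = sorted((porta[0], porta[1]))
--     s = sorted(colchao)
--     return "S" if len(s) >= 2 and s[0] <= menor and s[1] <= maior else "N"
-- ===== Notes on version B (the rewrite author's own statement) =====
-- stated objective: simpler
-- what changed: Replaces the two scan-and-mark loops (with 'x' sentinels and negative-index wraparound) by direct checks of the two smallest sorted mattress values against the sorted door pair.
import Mathlib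
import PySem

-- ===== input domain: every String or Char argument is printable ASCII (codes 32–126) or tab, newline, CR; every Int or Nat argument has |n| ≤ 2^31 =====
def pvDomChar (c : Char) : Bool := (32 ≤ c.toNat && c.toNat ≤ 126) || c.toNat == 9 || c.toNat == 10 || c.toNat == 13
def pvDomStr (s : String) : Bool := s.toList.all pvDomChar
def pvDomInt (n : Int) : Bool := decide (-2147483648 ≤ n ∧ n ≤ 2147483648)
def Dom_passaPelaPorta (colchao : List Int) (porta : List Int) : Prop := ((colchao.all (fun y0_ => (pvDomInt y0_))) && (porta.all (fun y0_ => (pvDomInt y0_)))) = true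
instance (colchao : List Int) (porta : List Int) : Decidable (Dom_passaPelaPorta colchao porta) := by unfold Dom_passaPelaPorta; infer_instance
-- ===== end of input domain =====

-- B replaces A's two scan-and-mark loops (mutating 'x' sentinels, negative-index
-- wraparound) by direct checks of the two smallest mattress dimensions: simpler.

-- ===== PORT A =====
-- The mutated list mixes ints and the string 'x'; we model an entry as
-- Option Int with none = 'x' (exact: A only ever writes 'x' and tests != 'x').
-- First loop of A: break at the first element with menor >= it, mark it.
-- (The 'none' branch is unreachable: the input list holds no 'x' yet; Python
-- would raise comparing int to 'x' there, our port just skips — never taken.)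
def pvLoop1 (menor : Int) : List (Option Int) → List (Option Int) × Bool
  | [] => ([], false)
  | none :: xs => let r := pvLoop1 menor xs; (none :: r.1, r.2)
  | some v :: xs =>
      if menor ≥ v then (none :: xs, true)
      else let r := pvLoop1 menor xs; (some v :: r.1, r.2)

-- Second loop of A: indices (i - tam) traverse the list front to back exactly
-- like the first loop; break at the first unmarked element with maior >= it.
def pvLoop2 (maior : Int) : List (Option Int) → List (Option Int) × Bool
  | [] => ([], false)
  | none :: xs => let r := pvLoop2 maior xs; (none :: r.1, r.2)
  | some v :: xs =>
      if maior ≥ v then (none :: xs, true)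
      else let r := pvLoop2 maior xs; (some v :: r.1, r.2)

def passaPelaPorta (colchao : List Int) (porta : List Int) : String :=
  match PySem.List.pyGet? porta 0, PySem.List.pyGet? porta 1 with
  | some p0, some p1 =>
      let maior := if p0 > p1 then p0 else p1
      let menor := if p0 > p1 then p1 else p0
      let colchao_ordenado := (PySem.List.sorted colchao (fun x => x) false).map some
      let r1 := pvLoop1 menor colchao_ordenado
      let r2 := pvLoop2 maior r1.1
      if r2.2 && r1.2 then "S" else "N"
  | _, _ => ""  -- porta[0]/porta[1] raise IndexError: outside Pre_

-- ===== PORT B =====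
def passaPelaPorta_alt (colchao : List Int) (porta : List Int) : String :=
  match PySem.List.pyGet? porta 0 with
  | none => ""  -- porta[0] raises IndexError: outside Pre_
  | some p0 =>
    match PySem.List.pyGet? porta 1 with
    | none => ""  -- porta[1] raises IndexError: outside Pre_
    | some p1 =>
      match PySem.List.sorted [p0, p1] (fun x => x) false with
      | menor :: maior :: _ =>
          match PySem.List.sorted colchao (fun x => x) false with
          | s0 :: s1 :: _ => if s0 ≤ menor ∧ s1 ≤ maior then "S" else "N"
          | _ => "N"
      | _ => "N"  -- unreachable: sorted of a pair has two elements

-- ===== PRECONDITION & SPEC =====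
-- A indexes porta[0] and porta[1]; it raises IndexError when porta has < 2 entries.
def Pre_passaPelaPorta (colchao : List Int) (porta : List Int) : Prop := 2 ≤ porta.length
instance (colchao : List Int) (porta : List Int) : Decidable (Pre_passaPelaPorta colchao porta) := by unfold Pre_passaPelaPorta; infer_instance
def pvWitness_passaPelaPorta : List Int × List Int := ([3, 1], [2, 5])

def Spec_passaPelaPorta (colchao : List Int) (porta : List Int) (out : String) : Prop := out = passaPelaPorta_alt colchao porta
instance (colchao : List Int) (porta : List Int) (out : String) : Decidable (Spec_passaPelaPorta colchao porta out) := by unfold Spec_passaPelaPorta; infer_instance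

-- ===== CLAIM (what is proved, stated in full; the proofs are below) =====
def Claim_equal_passaPelaPorta : Prop := ∀ (colchao : List Int) (porta : List Int), Dom_passaPelaPorta colchao porta → Pre_passaPelaPorta colchao porta → Spec_passaPelaPorta colchao porta (passaPelaPorta colchao porta)

-- ===== LEMMAS AND PROOFS =====

-- On an all-int list whose elements all exceed m, loop 1 finds nothing.
lemma pvLoop1_none (m : Int) (l : List Int) (h : ∀ y ∈ l, ¬ m ≥ y) :
    pvLoop1 m (l.map some) = (l.map some, false) := by
  induction l with
  | nil => rfl
  | cons a t ih =>
      simp only [List.map, pvLoop1]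
      rw [if_neg (h a (by simp))]
      rw [ih (fun y hy => h y (by simp [hy]))]

lemma pvLoop2_none (m : Int) (l : List Int) (h : ∀ y ∈ l, ¬ m ≥ y) :
    pvLoop2 m (l.map some) = (l.map some, false) := by
  induction l with
  | nil => rfl
  | cons a t ih =>
      simp only [List.map, pvLoop2]
      rw [if_neg (h a (by simp))]
      rw [ih (fun y hy => h y (by simp [hy]))]

-- Loop 2 skips a leading mark.
lemma pvLoop2_skip (m : Int) (xs : List (Option Int)) :
    pvLoop2 m (none :: xs) = (none :: (pvLoop2 m xs).1, (pvLoop2 m xs).2) := rfl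

theorem passaPelaPorta_spec : Claim_equal_passaPelaPorta := by
  intro colchao porta _ hpre
  unfold Spec_passaPelaPorta passaPelaPorta passaPelaPorta_alt
  unfold Pre_passaPelaPorta at hpre
  obtain ⟨p0, p1, rest, rfl⟩ : ∃ p0 p1 rest, porta = p0 :: p1 :: rest := by
    match porta, hpre with
    | p0 :: p1 :: rest, _ => exact ⟨p0, p1, rest, rfl⟩
  have h0 : PySem.List.pyGet? (p0 :: p1 :: rest) 0 = some p0 := by
    simp [PySem.List.pyGet?_zero]
  have h1 : PySem.List.pyGet? (p0 :: p1 :: rest) 1 = some p1 := by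
    have := PySem.List.pyGet?_ofNat (xs := p0 :: p1 :: rest) (n := 1) (by simp)
    simpa using this
  rw [h0, h1]
  dsimp only
  -- name menor/maior; sorted pair of the door
  have hpair : PySem.List.sorted [p0, p1] (fun x => x) false =
      [if p0 > p1 then p1 else p0, if p0 > p1 then p0 else p1] := by
    rcases le_or_gt p0 p1 with h | h
    · simp only [if_neg (not_lt.mpr h)]
      exact PySem.List.sorted_eq_self_of_pairwise [p0, p1] (fun x => x)
        (by simp [List.pairwise_cons, h])
    · simp only [if_pos h]
      exact PySem.List.sorted_eq_of_perm_of_pairwise_lt [p0, p1] [p1, p0] (fun x => x)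
        (List.Perm.swap p0 p1 []) (by simp [List.pairwise_cons, h])
  rw [hpair]
  set menor : Int := if p0 > p1 then p1 else p0 with hmen
  set maior : Int := if p0 > p1 then p0 else p1 with hmai
  set s : List Int := PySem.List.sorted colchao (fun x => x) false with hs
  have hpw : s.Pairwise (· ≤ ·) := PySem.List.sorted_pairwise colchao (fun x => x)
  match s, hpw with
  | [], _ => simp [pvLoop1, pvLoop2]
  | [a], hpw =>
      by_cases ha : menor ≥ a
      · simp [pvLoop1, pvLoop2, ha]
      · rw [show ([a].map some) = [a].map some from rfl] at *
        simp only [List.map, pvLoop1]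
        rw [if_neg ha]
        simp [pvLoop2]
  | a :: b :: t, hpw =>
      have hab : a ≤ b := (List.pairwise_cons.mp hpw).1 b (by simp)
      have hbt : ∀ y ∈ t, b ≤ y :=
        fun y hy => (List.pairwise_cons.mp (List.pairwise_cons.mp hpw).2).1 y hy
      have hat : ∀ y ∈ b :: t, a ≤ y := (List.pairwise_cons.mp hpw).1
      have hay : ∀ y ∈ a :: b :: t, a ≤ y := fun y hy => by
        rcases List.mem_cons.mp hy with rfl | hy'
        · exact le_refl y
        · exact hat y hy'
      have hby : ∀ y ∈ b :: t, b ≤ y := fun y hy => by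
        rcases List.mem_cons.mp hy with rfl | hy'
        · exact le_refl y
        · exact hbt y hy'
      by_cases ha : menor ≥ a
      · -- loop 1 marks the head
        have hl1 : pvLoop1 menor ((a :: b :: t).map some) =
            (none :: (b :: t).map some, true) := by
          simp [pvLoop1, ha]
        rw [hl1]
        by_cases hb : maior ≥ b
        · have hl2 : pvLoop2 maior ((b :: t).map some) = (none :: t.map some, true) := by
            simp [pvLoop2, hb]
          rw [pvLoop2_skip, hl2]
          simp [ge_iff_le.mp ha, ge_iff_le.mp hb]
        · have hl2 : pvLoop2 maior ((b :: t).map some) = ((b :: t).map some, false) :=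
            pvLoop2_none maior (b :: t) (fun y hy hle => hb (le_trans (hby y hy) hle))
          rw [pvLoop2_skip, hl2]
          simp only []
          rw [if_neg (by simp), if_neg (by intro hc; exact hb hc.2)]
      · -- smallest element already exceeds menor: loop 1 finds nothing
        have hl1 : pvLoop1 menor ((a :: b :: t).map some) =
            ((a :: b :: t).map some, false) :=
          pvLoop1_none menor (a :: b :: t) (fun y hy hle => ha (le_trans (hay y hy) hle))
        rw [hl1]
        simp only [Bool.and_false]
        rw [if_neg (by simp), if_neg (by intro hc; exact ha hc.1)]
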